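-- pv_equiv track=rewrite | github.com/kanochan/Humpopg | treetracker.py | num_inter
-- ===== SOURCE A (Python) =====
-- def num_inter(freq_info_ind, freq_info_sum):
--     for i in range(len(freq_info_ind)):
--         for j in freq_info_sum[i][:-1]:
--             a = 0
--             while a < len(freq_info_ind[i])-1:
--                 if j[0] == freq_info_ind[i][a][0]:
--                     freq_info_ind[i][a] = (freq_info_ind[i][a][0], freq_info_ind[i][a][1],j[1])
--                     break
--                 else:
--                     a+=1
--                     continue
--
--     return freq_info_ind
-- ===== SOURCE B (Python) =====
-- def num_inter(freq_info_ind, freq_info_sum):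
--     # Build a last-wins lookup per group (key -> whole sum entry, so the value
--     # field is only read on an actual match), then rewrite the group in one
--     # forward pass with a seen-set; first matching position per key wins.
--     # Mutates freq_info_ind in place, like A.
--     for i, group in enumerate(freq_info_ind):
--         if len(group) < 2:
--             continue
--         sum_map = {}
--         for j in freq_info_sum[i][:-1]:
--             sum_map[j[0]] = j
--         seen = set()
--         for a in range(len(group) - 1):
--             x = group[a]
--             k = x[:1]
--             if k and k[0] in sum_map and k[0] not in seen:
--                 group[a] = (x[0], x[1], sum_map[k[0]][1])
--                 seen.add(k[0])
--     return freq_info_ind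
-- ===== Notes on version B (the rewrite author's own statement) =====
-- stated objective: alternative
-- what changed: A rescans the ind group from the front for every sum entry (a while-loop per entry); B builds a last-wins key-to-entry dict from each sum group once and rewrites the group in a single forward pass with a seen-set, so the per-entry inner scans disappear; Pre_ excludes only inputs where A raises IndexError.
import Mathlib
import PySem

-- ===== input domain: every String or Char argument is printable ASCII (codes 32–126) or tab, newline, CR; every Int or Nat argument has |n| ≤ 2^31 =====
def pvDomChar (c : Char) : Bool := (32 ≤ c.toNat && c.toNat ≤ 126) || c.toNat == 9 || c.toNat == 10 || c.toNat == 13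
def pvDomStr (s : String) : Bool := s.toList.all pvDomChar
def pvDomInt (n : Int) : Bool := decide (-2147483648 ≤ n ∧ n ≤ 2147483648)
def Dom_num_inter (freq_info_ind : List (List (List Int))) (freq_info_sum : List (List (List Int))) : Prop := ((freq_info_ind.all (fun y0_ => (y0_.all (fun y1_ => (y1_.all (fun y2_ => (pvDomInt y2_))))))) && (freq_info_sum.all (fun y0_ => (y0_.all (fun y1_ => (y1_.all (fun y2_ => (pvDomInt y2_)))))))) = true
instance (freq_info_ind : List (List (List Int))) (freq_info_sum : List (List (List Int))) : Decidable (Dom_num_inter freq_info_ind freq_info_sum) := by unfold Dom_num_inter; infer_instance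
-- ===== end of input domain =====

-- B replaces A's per-sum-entry rescans of the ind group by one last-wins key→entry dict
-- per sum group plus a single forward pass with a seen-set (objective: alternative).
-- Both Pythons mutate freq_info_ind in place; the equivalence proved is about the return value.

-- ===== PORT A =====
-- the inner 'while a < len(freq_info_ind[i])-1' loop of A (lazy index accesses are
-- total via getD; Pre_num_inter excludes exactly the inputs where Python A would raise)
def pvLoopA (j : List Int) (g : List (List Int)) (a : Nat) : List (List Int) :=
  if _h : a < g.length - 1 then
    if j.getD 0 0 = (g.getD a []).getD 0 0 then
      g.set a [(g.getD a []).getD 0 0, (g.getD a []).getD 1 0, j.getD 1 0]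
    else pvLoopA j g (a + 1)
  else g
termination_by g.length - 1 - a
decreasing_by omega

def num_inter (freq_info_ind : List (List (List Int))) (freq_info_sum : List (List (List Int))) : List (List (List Int)) :=
  (PySem.List.enumerate freq_info_ind).map (fun p =>
    (PySem.List.slice (PySem.List.pyGetD freq_info_sum p.1 []) none (some (-1))).foldl
      (fun acc j => pvLoopA j acc 0) p.2)

-- ===== PORT B =====
-- sum_map = {}; for j in freq_info_sum[i][:-1]: sum_map[j[0]] = j
-- (j[0] via getD: Pre_num_inter admits only nonempty j here)
def pvSumMapB (s : List (List Int)) : PySem.Dict Int (List Int) :=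
  s.foldl (fun d j => d.insert (j.getD 0 0) j) PySem.Dict.empty

-- Source B's 'for a in range(len(group)-1)' pass; 'k = x[:1]; if k and …' is the head? test
def pvUpdB2 (m : PySem.Dict Int (List Int)) (seen : PySem.Set Int) : List (List Int) → List (List Int)
  | [] => []
  | x :: rest =>
    if rest.isEmpty then x :: rest
    else
      match x.head? with
      | some k =>
        if m.contains k && !seen.contains k then
          [x.getD 0 0, x.getD 1 0, (m.getD k []).getD 1 0] :: pvUpdB2 m (seen.add k) rest
        else x :: pvUpdB2 m seen rest
      | none => x :: pvUpdB2 m seen rest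

def num_inter_alt (freq_info_ind : List (List (List Int))) (freq_info_sum : List (List (List Int))) : List (List (List Int)) :=
  (PySem.List.enumerate freq_info_ind).map (fun p =>
    if p.2.length < 2 then p.2
    else pvUpdB2 (pvSumMapB (PySem.List.slice (PySem.List.pyGetD freq_info_sum p.1 []) none (some (-1))))
      PySem.Set.empty p.2)

-- ===== PRECONDITION & SPEC =====
-- A's scan for a sum entry j stops at the first group entry that is empty (raising) or
-- whose key matches j's (raising then if j or that entry is shorter than 2)
def pvStops (j x : List Int) : Bool := x.isEmpty || (x.head? == j.head?)

def pvEntryOK (g' : List (List Int)) (j : List Int) : Bool :=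
  !j.isEmpty &&
    ((g'.find? (pvStops j)).all fun res =>
      !res.isEmpty && decide (2 ≤ j.length) && decide (2 ≤ res.length))

-- Pre_num_inter holds exactly on the inputs where Python A returns (no IndexError):
-- enough sum groups, and — in every group of length ≥ 2 — each scanned sum entry is
-- nonempty and its scan stops at a length-≥2 match before reaching any empty group entry.
def Pre_num_inter (freq_info_ind : List (List (List Int))) (freq_info_sum : List (List (List Int))) : Prop :=
  freq_info_ind.length ≤ freq_info_sum.length ∧
  ∀ p ∈ PySem.List.enumerate freq_info_ind, 2 ≤ p.2.length →
    ∀ j ∈ PySem.List.slice (PySem.List.pyGetD freq_info_sum p.1 []) none (some (-1)),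
      pvEntryOK p.2.dropLast j = true
instance (freq_info_ind : List (List (List Int))) (freq_info_sum : List (List (List Int))) : Decidable (Pre_num_inter freq_info_ind freq_info_sum) := by unfold Pre_num_inter; infer_instance

def pvWitness_num_inter : List (List (List Int)) × List (List (List Int)) :=
  ([[[1, 2], [3, 4]]], [[[1, 9], [5, 5]]])

def Spec_num_inter (freq_info_ind : List (List (List Int))) (freq_info_sum : List (List (List Int))) (out : List (List (List Int))) : Prop := out = num_inter_alt freq_info_ind freq_info_sum
instance (freq_info_ind : List (List (List Int))) (freq_info_sum : List (List (List Int))) (out : List (List (List Int))) : Decidable (Spec_num_inter freq_info_ind freq_info_sum out) := by unfold Spec_num_inter; infer_instance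

-- ===== CLAIM (what is proved, stated in full; the proofs are below) =====
def Claim_equal_num_inter : Prop := ∀ (freq_info_ind : List (List (List Int))) (freq_info_sum : List (List (List Int))), Dom_num_inter freq_info_ind freq_info_sum → Pre_num_inter freq_info_ind freq_info_sum → Spec_num_inter freq_info_ind freq_info_sum (num_inter freq_info_ind freq_info_sum)

-- ===== LEMMAS AND PROOFS =====

-- A's inner while loop, recast structurally: update the first matching non-last entry
def updFirst (j : List Int) : List (List Int) → List (List Int)
  | [] => []
  | x :: rest =>
    if rest.isEmpty then x :: rest
    else if j.getD 0 0 = x.getD 0 0 then [x.getD 0 0, x.getD 1 0, j.getD 1 0] :: rest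
    else x :: updFirst j rest

-- proof-side dense form of B's pass: keys every entry by getD (no emptiness skip);
-- it agrees with pvUpdB2 under Pre_ and with A's loop unconditionally
def pvUpdB (m : PySem.Dict Int (List Int)) (seen : PySem.Set Int) : List (List Int) → List (List Int)
  | [] => []
  | x :: rest =>
    if rest.isEmpty then x :: pvUpdB m seen rest
    else
      match m.get? (x.getD 0 0) with
      | some v =>
        if seen.contains (x.getD 0 0) then x :: pvUpdB m seen rest
        else [x.getD 0 0, x.getD 1 0, v.getD 1 0] :: pvUpdB m (seen.add (x.getD 0 0)) rest
      | none => x :: pvUpdB m seen rest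

theorem updFirst_cons (j x : List Int) (rest : List (List Int)) (h : rest.isEmpty = false) :
    updFirst j (x :: rest) =
      if j.getD 0 0 = x.getD 0 0 then [x.getD 0 0, x.getD 1 0, j.getD 1 0] :: rest
      else x :: updFirst j rest := by
  simp only [updFirst, h, Bool.false_eq_true, if_false]

theorem pvUpdB_cons (m : PySem.Dict Int (List Int)) (seen : PySem.Set Int) (x : List Int)
    (rest : List (List Int)) (h : rest.isEmpty = false) :
    pvUpdB m seen (x :: rest) =
      match m.get? (x.getD 0 0) with
      | some v =>
        if seen.contains (x.getD 0 0) then x :: pvUpdB m seen rest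
        else [x.getD 0 0, x.getD 1 0, v.getD 1 0] :: pvUpdB m (seen.add (x.getD 0 0)) rest
      | none => x :: pvUpdB m seen rest := by
  simp only [pvUpdB, h, Bool.false_eq_true, if_false]

theorem pvLoopA_eq_updFirst (j : List Int) (g : List (List Int)) (a : Nat) :
    pvLoopA j g a = g.take a ++ updFirst j (g.drop a) := by
  fun_induction pvLoopA j g a with
  | case1 a h hmatch =>
    have ha : a < g.length := by omega
    have hd : g.drop a = g[a] :: g.drop (a + 1) := List.drop_eq_getElem_cons ha
    have hgd : g.getD a [] = g[a] := List.getD_eq_getElem g [] ha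
    have hne : (g.drop (a + 1)).isEmpty = false := by
      rw [List.isEmpty_eq_false_iff]
      simp only [ne_eq, List.drop_eq_nil_iff]
      omega
    rw [hgd] at hmatch
    rw [hgd, hd, List.set_eq_take_append_cons_drop, if_pos ha]
    rw [updFirst_cons _ _ _ hne, if_pos hmatch]
  | case2 a h hmatch ih =>
    have ha : a < g.length := by omega
    have hd : g.drop a = g[a] :: g.drop (a + 1) := List.drop_eq_getElem_cons ha
    have hgd : g.getD a [] = g[a] := List.getD_eq_getElem g [] ha
    have hne : (g.drop (a + 1)).isEmpty = false := by
      rw [List.isEmpty_eq_false_iff]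
      simp only [ne_eq, List.drop_eq_nil_iff]
      omega
    rw [hgd] at hmatch
    rw [ih, hd, updFirst_cons _ _ _ hne, if_neg hmatch]
    have ht : List.take (a + 1) g = List.take a g ++ [g[a]] := by
      rw [List.take_add_one, List.getElem?_eq_getElem ha]
      rfl
    rw [ht, List.append_assoc]
    rfl
  | case3 a h =>
    have hupd : updFirst j (g.drop a) = g.drop a := by
      rcases e : g.drop a with _ | ⟨x, r⟩
      · rfl
      · have hlen := congrArg List.length e
        simp only [List.length_drop, List.length_cons] at hlen
        have hr : r = [] := by
          apply List.eq_nil_of_length_eq_zero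
          omega
        subst hr
        simp [updFirst]
    rw [hupd, List.take_append_drop]

theorem length_pvUpdB (m : PySem.Dict Int (List Int)) (seen : PySem.Set Int) (g : List (List Int)) :
    (pvUpdB m seen g).length = g.length := by
  induction g generalizing seen with
  | nil => simp [pvUpdB]
  | cons x rest ih =>
    rcases hm : m.get? (x.getD 0 0) with _ | v <;>
      simp only [pvUpdB, hm] <;> split_ifs <;> simp [ih]

theorem isEmpty_pvUpdB_false (m : PySem.Dict Int (List Int)) (seen : PySem.Set Int)
    (g : List (List Int)) (h : g.isEmpty = false) : (pvUpdB m seen g).isEmpty = false := by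
  rw [List.isEmpty_eq_false_iff] at h
  rw [List.isEmpty_eq_false_iff, ← List.length_pos_iff, length_pvUpdB, List.length_pos_iff]
  exact h

theorem pvUpdB_empty (seen : PySem.Set Int) (g : List (List Int)) :
    pvUpdB PySem.Dict.empty seen g = g := by
  induction g generalizing seen with
  | nil => rfl
  | cons x rest ih =>
    have hm : (PySem.Dict.empty : PySem.Dict Int (List Int)).get? (x.getD 0 0) = none := by
      simp [pysem]
    simp only [pvUpdB, hm]
    split_ifs <;> simp [ih]

theorem pvUpdB_insert_skip (m : PySem.Dict Int (List Int)) (k : Int) (v : List Int)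
    (g : List (List Int)) (s1 s2 : PySem.Set Int) (h2 : k ∈ s2)
    (heq : ∀ k', k' ≠ k → (k' ∈ s1 ↔ k' ∈ s2)) (h1 : m.get? k = none ∨ k ∈ s1) :
    pvUpdB (m.insert k v) s2 g = pvUpdB m s1 g := by
  induction g generalizing s1 s2 with
  | nil => rfl
  | cons x rest ih =>
    have h2' : k ∈ s2.add (x.getD 0 0) := by
      rw [PySem.Set.mem_add]; exact Or.inl h2
    have heq' : ∀ k', k' ≠ k → (k' ∈ s1.add (x.getD 0 0) ↔ k' ∈ s2.add (x.getD 0 0)) := by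
      intro k' hk'
      rw [PySem.Set.mem_add, PySem.Set.mem_add, heq _ hk']
    have h1' : m.get? k = none ∨ k ∈ s1.add (x.getD 0 0) := by
      rcases h1 with h1 | h1
      · exact Or.inl h1
      · exact Or.inr (by rw [PySem.Set.mem_add]; exact Or.inl h1)
    by_cases hk0 : x.getD 0 0 = k
    · have hins : (m.insert k v).get? (x.getD 0 0) = some v := by
        rw [hk0]; exact PySem.Dict.get?_insert_self m k v
      have hs2 : PySem.Set.contains s2 (x.getD 0 0) = true := by
        rw [PySem.Set.contains_iff, hk0]; exact h2
      rcases hm : m.get? (x.getD 0 0) with _ | w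
      · simp only [pvUpdB, hins, hm]
        split_ifs <;> first
          | exact congrArg _ (ih s1 s2 h2 heq h1)
          | simp_all
      · have hs1 : PySem.Set.contains s1 (x.getD 0 0) = true := by
          rw [PySem.Set.contains_iff, hk0]
          rcases h1 with h1 | h1
          · rw [hk0] at hm; rw [h1] at hm; cases hm
          · exact h1
        simp only [pvUpdB, hins, hm]
        split_ifs <;> first
          | exact congrArg _ (ih s1 s2 h2 heq h1)
          | simp_all
    · have hins : (m.insert k v).get? (x.getD 0 0) = m.get? (x.getD 0 0) :=
        PySem.Dict.get?_insert_of_ne m v hk0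
      have hcont : PySem.Set.contains s1 (x.getD 0 0) = PySem.Set.contains s2 (x.getD 0 0) := by
        rcases hq : PySem.Set.contains s2 (x.getD 0 0) with _ | _
        · rcases hp : PySem.Set.contains s1 (x.getD 0 0) with _ | _
          · rfl
          · rw [PySem.Set.contains_iff, heq _ hk0, ← PySem.Set.contains_iff] at hp
            rw [hp] at hq; cases hq
        · rw [PySem.Set.contains_iff] at hq ⊢
          rw [heq _ hk0]; exact hq
      rcases hm : m.get? (x.getD 0 0) with _ | w <;>
        · simp only [pvUpdB, hins, hm]
          split_ifs <;> first
            | exact congrArg _ (ih s1 s2 h2 heq h1)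
            | exact congrArg _ (ih _ _ h2' heq' h1')
            | simp_all

theorem updFirst_pvUpdB (j : List Int) (m : PySem.Dict Int (List Int)) (g : List (List Int))
    (seen : PySem.Set Int) (hk : j.getD 0 0 ∉ seen) :
    updFirst j (pvUpdB m seen g) = pvUpdB (m.insert (j.getD 0 0) j) seen g := by
  induction g generalizing seen with
  | nil => rfl
  | cons x rest ih =>
    have hkc : PySem.Set.contains seen (j.getD 0 0) = false := by
      rcases hq : PySem.Set.contains seen (j.getD 0 0) with _ | _
      · rfl
      · rw [PySem.Set.contains_iff] at hq; exact absurd hq hk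
    rcases hre : rest.isEmpty with _ | _
    · have hne := isEmpty_pvUpdB_false m seen rest hre
      have hne2 := isEmpty_pvUpdB_false m (seen.add (x.getD 0 0)) rest hre
      by_cases hk0 : j.getD 0 0 = x.getD 0 0
      · have hsx : PySem.Set.contains seen (x.getD 0 0) = false := by rw [← hk0]; exact hkc
        have hins : (m.insert (j.getD 0 0) j).get? (x.getD 0 0) = some j := by
          rw [← hk0]; exact PySem.Dict.get?_insert_self _ _ _
        rcases hm : m.get? (x.getD 0 0) with _ | w
        · -- A rewrites x in place; on the B side the freshly inserted key fires now
          have htail : pvUpdB (m.insert (j.getD 0 0) j) (seen.add (x.getD 0 0)) rest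
              = pvUpdB m seen rest := by
            apply pvUpdB_insert_skip
            · rw [PySem.Set.mem_add]; exact Or.inr hk0
            · intro k' hk'
              rw [PySem.Set.mem_add]
              constructor
              · exact fun h => Or.inl h
              · rintro (h | h)
                · exact h
                · rw [hk0] at hk'; exact absurd h hk'
            · rw [← hk0] at hm; exact Or.inl hm
          rw [pvUpdB_cons m seen x rest hre]
          simp only [hm]
          rw [pvUpdB_cons _ _ _ _ hre]
          simp only [hins, hsx, Bool.false_eq_true, if_false]
          rw [htail, updFirst_cons _ _ _ hne, if_pos hk0]
        · have htail : pvUpdB (m.insert (j.getD 0 0) j) (seen.add (x.getD 0 0)) rest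
              = pvUpdB m (seen.add (x.getD 0 0)) rest := by
            apply pvUpdB_insert_skip
            · rw [PySem.Set.mem_add]; exact Or.inr hk0
            · intro k' _; rfl
            · exact Or.inr (by rw [PySem.Set.mem_add]; exact Or.inr hk0)
          rw [pvUpdB_cons m seen x rest hre]
          simp only [hm, hsx, Bool.false_eq_true, if_false]
          rw [pvUpdB_cons _ _ _ _ hre]
          simp only [hins, hsx, Bool.false_eq_true, if_false]
          rw [htail, updFirst_cons _ _ _ hne2,
            if_pos (show j.getD 0 0 = ([x.getD 0 0, x.getD 1 0, w.getD 1 0] : List Int).getD 0 0 from hk0)]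
          rfl
      · have hins : (m.insert (j.getD 0 0) j).get? (x.getD 0 0) = m.get? (x.getD 0 0) :=
          PySem.Dict.get?_insert_of_ne m j (fun h => hk0 h.symm)
        rcases hm : m.get? (x.getD 0 0) with _ | w
        · rw [pvUpdB_cons m seen x rest hre]
          simp only [hm]
          rw [pvUpdB_cons _ _ _ _ hre]
          simp only [hins, hm]
          rw [updFirst_cons _ _ _ hne, if_neg hk0]
          exact congrArg _ (ih seen hk)
        · rcases hs : PySem.Set.contains seen (x.getD 0 0) with _ | _
          · have hk' : j.getD 0 0 ∉ seen.add (x.getD 0 0) := by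
              rw [PySem.Set.mem_add]
              rintro (h | h)
              · exact hk h
              · exact hk0 h
            rw [pvUpdB_cons m seen x rest hre]
            simp only [hm, hs, Bool.false_eq_true, if_false]
            rw [pvUpdB_cons _ _ _ _ hre]
            simp only [hins, hm, hs, Bool.false_eq_true, if_false]
            rw [updFirst_cons _ _ _ hne2,
              if_neg (show ¬ j.getD 0 0 = ([x.getD 0 0, x.getD 1 0, w.getD 1 0] : List Int).getD 0 0 from hk0)]
            exact congrArg _ (ih _ hk')
          · rw [pvUpdB_cons m seen x rest hre]
            simp only [hm, hs, if_true]
            rw [pvUpdB_cons _ _ _ _ hre]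
            simp only [hins, hm, hs, if_true]
            rw [updFirst_cons _ _ _ hne, if_neg hk0]
            exact congrArg _ (ih seen hk)
    · have hrnil : rest = [] := by rw [← List.isEmpty_iff]; exact hre
      subst hrnil
      rcases hm : m.get? (x.getD 0 0) with _ | w <;>
        rcases hs : PySem.Set.contains seen (x.getD 0 0) with _ | _ <;>
          simp [pvUpdB, updFirst, hm, hs]

theorem foldl_updFirst (js : List (List Int)) (m : PySem.Dict Int (List Int))
    (g : List (List Int)) :
    js.foldl (fun acc j => updFirst j acc) (pvUpdB m PySem.Set.empty g)
      = pvUpdB (js.foldl (fun d j => d.insert (j.getD 0 0) j) m) PySem.Set.empty g := by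
  induction js generalizing m with
  | nil => rfl
  | cons j js ih =>
    simp only [List.foldl_cons]
    rw [updFirst_pvUpdB j m g PySem.Set.empty (by simp [PySem.Set.empty])]
    exact ih _

theorem group_eq (js : List (List Int)) (g : List (List Int)) :
    js.foldl (fun acc j => pvLoopA j acc 0) g = pvUpdB (pvSumMapB js) PySem.Set.empty g := by
  have hfun : (fun (acc : List (List Int)) (j : List Int) => pvLoopA j acc 0)
      = fun acc j => updFirst j acc := by
    funext acc j
    rw [pvLoopA_eq_updFirst]
    simp
  calc js.foldl (fun acc j => pvLoopA j acc 0) g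
      = js.foldl (fun acc j => updFirst j acc) (pvUpdB PySem.Dict.empty PySem.Set.empty g) := by
        rw [hfun, pvUpdB_empty]
    _ = pvUpdB (js.foldl (fun d j => d.insert (j.getD 0 0) j) PySem.Dict.empty)
          PySem.Set.empty g := foldl_updFirst js PySem.Dict.empty g
    _ = pvUpdB (pvSumMapB js) PySem.Set.empty g := rfl

-- ---- bridge: the dense pass equals B's empty-skipping pass under Pre_ ----

theorem sumMap_key_aux (js : List (List Int)) (k : Int) (d : PySem.Dict Int (List Int))
    (hc : ∀ j ∈ js, j.getD 0 0 ≠ k) (hd : d.get? k = none) :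
    (js.foldl (fun d j => d.insert (j.getD 0 0) j) d).get? k = none := by
  induction js generalizing d with
  | nil => exact hd
  | cons j t ih =>
    simp only [List.foldl_cons]
    apply ih _ (fun a ha => hc a (List.mem_cons_of_mem _ ha))
    rw [PySem.Dict.get?_insert_of_ne _ _ (fun h => hc j List.mem_cons_self h.symm)]
    exact hd

theorem sumMap_key (js : List (List Int)) (k : Int) (h : (pvSumMapB js).get? k ≠ none) :
    ∃ j ∈ js, j.getD 0 0 = k := by
  by_contra hc
  push_neg at hc
  exact h (sumMap_key_aux js k PySem.Dict.empty hc (by simp [pysem]))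

-- index-shift for the empty-entry hypothesis of pvUpdB_eq_pvUpdB2
theorem shiftH (m : PySem.Dict Int (List Int)) (seen seen' : PySem.Set Int)
    (x : List Int) (rest : List (List Int))
    (hsub : seen.contains 0 = true → seen'.contains 0 = true)
    (hx : x.head? = some (0 : Int) → m.get? 0 = none ∨ seen'.contains 0 = true)
    (H : ∀ i, i + 1 < (x :: rest).length → (x :: rest)[i]? = some [] →
      m.get? 0 = none ∨ seen.contains 0 = true ∨
        ∃ q x', q < i ∧ (x :: rest)[q]? = some x' ∧ x'.head? = some (0 : Int)) :
    ∀ i, i + 1 < rest.length → rest[i]? = some [] →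
      m.get? 0 = none ∨ seen'.contains 0 = true ∨
        ∃ q x', q < i ∧ rest[q]? = some x' ∧ x'.head? = some (0 : Int) := by
  intro i hi hsome
  have h := H (i + 1) (by simp; omega) (by simpa using hsome)
  rcases h with h | h | ⟨q, x', hq, hget, hh⟩
  · exact Or.inl h
  · exact Or.inr (Or.inl (hsub h))
  · cases q with
    | zero =>
      have hx' : x' = x := by simpa using hget.symm
      subst hx'
      rcases hx hh with h | h
      · exact Or.inl h
      · exact Or.inr (Or.inl h)
    | succ q' =>
      exact Or.inr (Or.inr ⟨q', x', by omega, by simpa using hget, hh⟩)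

theorem contains_add_self (s : PySem.Set Int) (k : Int) :
    (s.add k).contains k = true := by
  rw [PySem.Set.contains_iff, PySem.Set.mem_add]; exact Or.inr rfl

theorem contains_add_mono (s : PySem.Set Int) (k x : Int) (h : s.contains x = true) :
    (s.add k).contains x = true := by
  rw [PySem.Set.contains_iff, PySem.Set.mem_add]
  rw [PySem.Set.contains_iff] at h
  exact Or.inl h

theorem pvUpdB_eq_pvUpdB2 (m : PySem.Dict Int (List Int)) (seen : PySem.Set Int)
    (g : List (List Int))
    (H : ∀ i, i + 1 < g.length → g[i]? = some [] →
      m.get? 0 = none ∨ seen.contains 0 = true ∨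
        ∃ q x', q < i ∧ g[q]? = some x' ∧ x'.head? = some (0 : Int)) :
    pvUpdB m seen g = pvUpdB2 m seen g := by
  induction g generalizing seen with
  | nil => rfl
  | cons x rest ih =>
    rcases hre : rest.isEmpty with _ | _
    · -- rest nonempty
      rcases hxh : x.head? with _ | k
      · -- x = []
        have hx : x = [] := List.head?_eq_none_iff.mp hxh
        subst hx
        have h0 := H 0 (by cases rest with | nil => simp at hre | cons a t => simp) (by simp)
        have hskip : m.get? 0 = none ∨ seen.contains 0 = true := by
          rcases h0 with h | h | ⟨q, x', hq, _, _⟩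
          · exact Or.inl h
          · exact Or.inr h
          · omega
        have hrec := ih seen (shiftH m seen seen [] rest (fun h => h)
          (fun h => by simp at h) H)
        have hg : (List.getD ([] : List Int) 0 0) = 0 := rfl
        rcases hskip with h | h
        · rw [pvUpdB_cons _ _ _ _ hre]
          simp only [hg, h]
          simp only [pvUpdB2, hre, Bool.false_eq_true, if_false, hxh]
          exact congrArg _ hrec
        · rw [pvUpdB_cons _ _ _ _ hre]
          rcases hm : m.get? ((0 : Int)) with _ | v
          · simp only [hg, hm]
            simp only [pvUpdB2, hre, Bool.false_eq_true, if_false, hxh]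
            exact congrArg _ hrec
          · simp only [hg, hm, h, if_true]
            simp only [pvUpdB2, hre, Bool.false_eq_true, if_false, hxh]
            exact congrArg _ hrec
      · -- x nonempty with head k
        have hx0 : x.getD 0 0 = k := by
          cases x with
          | nil => simp at hxh
          | cons a t => simp at hxh; simp [hxh]
        have hk0 : k = 0 → x.head? = some (0 : Int) := fun h => by rw [hxh, h]
        rcases hm : m.get? k with _ | v
        · -- key absent: both skip
          have hcont : m.contains k = false := by
            rw [PySem.Dict.contains_eq_isSome_get?, hm]; rfl
          have hrec := ih seen (shiftH m seen seen x rest (fun h => h)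
            (fun h => by
              have : k = 0 := by rw [hxh] at h; exact (Option.some_inj.mp h)
              exact Or.inl (this ▸ hm)) H)
          rw [pvUpdB_cons _ _ _ _ hre]
          simp only [hx0, hm]
          simp only [pvUpdB2, hre, Bool.false_eq_true, if_false, hxh, hcont,
            Bool.false_and]
          exact congrArg _ hrec
        · have hcont : m.contains k = true := by
            rw [PySem.Dict.contains_eq_isSome_get?, hm]; rfl
          rcases hs : seen.contains k with _ | _
          · -- fresh key: both update
            have hrec := ih (seen.add k) (shiftH m seen (seen.add k) x rest
              (fun h => contains_add_mono seen k 0 h)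
              (fun h => by
                have hk : k = 0 := by rw [hxh] at h; exact (Option.some_inj.mp h)
                exact Or.inr (hk ▸ contains_add_self seen k)) H)
            have hgetD : m.getD k [] = v := by
              show (m.get? k).getD [] = v
              rw [hm]; rfl
            rw [pvUpdB_cons _ _ _ _ hre]
            simp only [hx0, hm, hs, Bool.false_eq_true, if_false]
            simp only [pvUpdB2, hre, Bool.false_eq_true, if_false, hxh, hcont, hs,
              Bool.not_false, Bool.and_true, if_true, hgetD, hx0]
            exact congrArg _ hrec
          · -- seen key: both skip
            have hrec := ih seen (shiftH m seen seen x rest (fun h => h)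
              (fun h => by
                have hk : k = 0 := by rw [hxh] at h; exact (Option.some_inj.mp h)
                exact Or.inr (hk ▸ hs)) H)
            rw [pvUpdB_cons _ _ _ _ hre]
            simp only [hx0, hm, hs, if_true]
            simp only [pvUpdB2, hre, Bool.false_eq_true, if_false, hxh, hcont, hs,
              Bool.not_true, Bool.and_false, if_false]
            exact congrArg _ hrec
    · -- rest = []
      have hrnil : rest = [] := by rw [← List.isEmpty_iff]; exact hre
      subst hrnil
      rcases hm : m.get? (x.getD 0 0) with _ | v <;> simp [pvUpdB, pvUpdB2, hm]

theorem group_bridge (g : List (List Int)) (js : List (List Int))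
    (hok : 2 ≤ g.length → ∀ j ∈ js, pvEntryOK g.dropLast j = true) :
    pvUpdB (pvSumMapB js) PySem.Set.empty g =
      if g.length < 2 then g else pvUpdB2 (pvSumMapB js) PySem.Set.empty g := by
  by_cases hlen : g.length < 2
  · rw [if_pos hlen]
    match g, hlen with
    | [], _ => rfl
    | [x], _ => simp [pvUpdB]
  · rw [if_neg hlen]
    apply pvUpdB_eq_pvUpdB2
    intro i hi hsome
    by_cases hm : (pvSumMapB js).get? 0 = none
    · exact Or.inl hm
    · right; right
      obtain ⟨j, hjmem, hj0⟩ := sumMap_key js 0 hm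
      have hok' := hok (by omega) j hjmem
      have hjne : j ≠ [] := by
        intro h
        subst h
        simp [pvEntryOK] at hok'
      have hjh : j.head? = some (0 : Int) := by
        cases j with
        | nil => exact absurd rfl hjne
        | cons a t => simp at hj0; simp [hj0]
      have hi' : i < g.dropLast.length := by
        rw [List.length_dropLast]; omega
      have hgi : g.dropLast[i]? = some [] := by
        rw [List.getElem?_dropLast]
        simp only [show i < g.length - 1 by omega, if_true]
        exact hsome
      have hgi' : g.dropLast[i] = [] := by
        rw [List.getElem?_eq_getElem hi'] at hgi
        exact Option.some_inj.mp hgi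
      have hstop : pvStops j g.dropLast[i] = true := by
        simp [pvStops, hgi']
      have hfind : ∃ res, g.dropLast.find? (pvStops j) = some res := by
        rw [← Option.isSome_iff_exists, List.find?_isSome]
        exact ⟨_, List.getElem_mem hi', hstop⟩
      obtain ⟨res, hres⟩ := hfind
      obtain ⟨hpres, idx, hidx, hresidx, hbefore⟩ := List.find?_eq_some_iff_getElem.mp hres
      have hok2 : res ≠ [] ∧ 2 ≤ j.length ∧ 2 ≤ res.length := by
        simp [pvEntryOK, hres] at hok'
        tauto
      have hidxlt : idx < i := by
        rcases Nat.lt_trichotomy idx i with h | h | h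
        · exact h
        · subst h
          rw [hresidx] at hgi'
          exact absurd hgi' hok2.1
        · have := hbefore i h
          rw [hgi'] at this
          simp [pvStops] at this
      have hrh : res.head? = some (0 : Int) := by
        have hne : res.isEmpty = false := by
          rw [List.isEmpty_eq_false_iff]; exact hok2.1
        simp only [pvStops, hne, Bool.false_or] at hpres
        rw [hjh] at hpres
        exact eq_of_beq hpres
      refine ⟨idx, res, hidxlt, ?_, hrh⟩
      have hdl : g.dropLast[idx]? = some res := by
        rw [List.getElem?_eq_getElem hidx, hresidx]
      rw [List.getElem?_dropLast] at hdl
      rw [List.length_dropLast] at hidx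
      simp only [show idx < g.length - 1 from hidx, if_true] at hdl
      exact hdl

-- ===== VERDICT (by name: the statement is the Claim_ definition above) =====
theorem num_inter_spec : Claim_equal_num_inter := by
  intro ind sums _ hpre
  unfold Spec_num_inter num_inter num_inter_alt
  apply List.map_congr_left
  intro p hp
  rw [group_eq]
  exact group_bridge p.2 _ (fun h2 => hpre.2 p hp h2)
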